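-- pv_equiv track=rewrite | github.com/faisyed/CodeJam | practice/leetcode/easy/551.py | checkRecord
-- ===== SOURCE A (Python) =====
-- def checkRecord(s):
--     a_cnt = 0
--     l_cnt = 0
--     for ind, val in enumerate(s):
--         if val == "A":
--             a_cnt += 1
--             l_cnt = 0
--         elif val == "L":
--             l_cnt+=1
--         else:
--             l_cnt = 0
--         if a_cnt>1 or l_cnt>2:
--             return False
--     return True
-- ===== SOURCE B (Python) =====
-- def checkRecord(s):
--     return s.count("A") < 2 and "LLL" not in s
-- ===== Notes on version B (the rewrite author's own statement) =====
-- stated objective: idiomatic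
-- what changed: Replaces the per-character state machine (absence counter plus resetting consecutive-late counter with early return) by two built-in whole-string scans: an absence count compared with 2 and a substring membership test for a triple-late run.
import Mathlib
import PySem

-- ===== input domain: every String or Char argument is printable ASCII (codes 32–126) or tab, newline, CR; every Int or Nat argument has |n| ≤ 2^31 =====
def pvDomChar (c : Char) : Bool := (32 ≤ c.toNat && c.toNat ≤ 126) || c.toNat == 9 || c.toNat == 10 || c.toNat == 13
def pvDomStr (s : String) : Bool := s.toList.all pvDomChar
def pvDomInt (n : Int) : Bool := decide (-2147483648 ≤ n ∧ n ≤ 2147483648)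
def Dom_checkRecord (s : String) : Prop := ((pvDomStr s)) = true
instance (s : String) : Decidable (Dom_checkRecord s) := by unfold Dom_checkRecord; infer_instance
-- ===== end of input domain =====

-- B replaces A's per-character counter state machine (with early return) by two
-- built-in scans: count of 'A' and an 'LLL' substring test; same cost, more idiomatic.

-- ===== PORT A =====
-- the for-loop over enumerate(s) with state (a_cnt, l_cnt) and the early 'return False'
def checkRecordGo : List Char → Int → Int → Bool
  | [], _, _ => true
  | v :: rest, a_cnt, l_cnt =>
    let a_cnt' : Int := if v = 'A' then a_cnt + 1 else a_cnt
    let l_cnt' : Int := if v = 'A' then 0 else if v = 'L' then l_cnt + 1 else 0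
    if a_cnt' > 1 ∨ l_cnt' > 2 then false else checkRecordGo rest a_cnt' l_cnt'

def checkRecord (s : String) : Bool := checkRecordGo s.toList 0 0

-- ===== PORT B =====
def checkRecord_alt (s : String) : Bool :=
  decide (PySem.Str.count s "A" < 2) && !PySem.Str.isIn "LLL" s

-- ===== PRECONDITION & SPEC =====
def Spec_checkRecord (s : String) (out : Bool) : Prop := out = checkRecord_alt s
instance (s : String) (out : Bool) : Decidable (Spec_checkRecord s out) := by unfold Spec_checkRecord; infer_instance

-- ===== CLAIM (what is proved, stated in full; the proofs are below) =====
def Claim_equal_checkRecord : Prop := ∀ (s : String), Dom_checkRecord s → Spec_checkRecord s (checkRecord s)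

-- ===== LEMMAS AND PROOFS =====

-- step lemmas for A's loop
lemma go_cons_A (rest : List Char) (a l : Int) :
    checkRecordGo ('A' :: rest) a l =
      if a + 1 > 1 then false else checkRecordGo rest (a + 1) 0 := by
  norm_num [checkRecordGo]

lemma go_cons_L (rest : List Char) (a l : Int) :
    checkRecordGo ('L' :: rest) a l =
      if a > 1 ∨ l + 1 > 2 then false else checkRecordGo rest a (l + 1) := by
  have hne : ('L' : Char) = 'A' ↔ False := by decide
  have h2 : (2 : Int) < l + 1 ↔ 2 ≤ l := by omega
  norm_num [checkRecordGo, hne, h2]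

lemma go_cons_other (v : Char) (hA : v ≠ 'A') (hL : v ≠ 'L') (rest : List Char) (a l : Int) :
    checkRecordGo (v :: rest) a l =
      if a > 1 then false else checkRecordGo rest a 0 := by
  norm_num [checkRecordGo, hA, hL]

-- s.count(c) for a single-character needle is the character count
lemma count_go_singleton (c : Char) : ∀ (fuel : Nat) (l : List Char) (acc : Nat),
    l.length ≤ fuel → PySem.Chars.count.go [c] fuel l acc = acc + l.count c := by
  intro fuel
  induction fuel with
  | zero =>
    intro l acc h
    have : l = [] := List.eq_nil_of_length_eq_zero (Nat.le_zero.mp h)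
    subst this
    simp [PySem.Chars.count.go]
  | succ n ih =>
    intro l acc h
    cases l with
    | nil => simp [PySem.Chars.count.go]
    | cons x t =>
      have h' : t.length ≤ n := by simpa using Nat.lt_succ_iff.mp (by simpa using h)
      by_cases hx : c = x
      · subst hx
        simp [PySem.Chars.count.go, List.isPrefixOf, ih t (acc + 1) h']
        omega
      · have hb : (c == x) = false := beq_eq_false_iff_ne.mpr hx
        simp [PySem.Chars.count.go, List.isPrefixOf, hb, ih t acc h', Ne.symm hx]

lemma count_singleton (cs : List Char) (c : Char) :
    PySem.Chars.count cs [c] = cs.count c := by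
  simp [PySem.Chars.count, count_go_singleton c cs.length cs 0 le_rfl]

-- replicate-prefix helpers
lemma replicate_prefix_cons (k : Nat) (c x : Char) (xs : List Char) :
    List.replicate (k + 1) c <+: x :: xs ↔ x = c ∧ List.replicate k c <+: xs := by
  rw [List.replicate_succ, List.cons_prefix_cons]
  tauto

lemma replicate_prefix_mono {j k : Nat} (c : Char) (xs : List Char) (h : j ≤ k)
    (hp : List.replicate k c <+: xs) : List.replicate j c <+: xs := by
  refine List.IsPrefix.trans ⟨List.replicate (k - j) c, ?_⟩ hp
  rw [← List.replicate_add]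
  congr 1
  omega

-- the loop invariant: A's state machine succeeds iff the A-budget is kept, no run of
-- three L's occurs, and no run of (3 - l_cnt) L's starts the remaining input
lemma go_spec (cs : List Char) : ∀ (a l : Int), 0 ≤ a → a ≤ 1 → 0 ≤ l → l ≤ 2 →
    (checkRecordGo cs a l = true ↔
      a + cs.count 'A' ≤ 1 ∧ ¬ (['L', 'L', 'L'] <:+: cs) ∧
        ¬ (List.replicate (3 - l.toNat) 'L' <+: cs)) := by
  induction cs with
  | nil =>
    intro a l ha0 ha1 hl0 hl2
    have h3 : 3 - l.toNat ≠ 0 := by omega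
    simp [checkRecordGo, List.prefix_nil, List.replicate_eq_nil_iff, h3]
    omega
  | cons v rest ih =>
    intro a l ha0 ha1 hl0 hl2
    have hrep : 3 - l.toNat = (2 - l.toNat) + 1 := by omega
    by_cases hA : v = 'A'
    · subst hA
      rw [go_cons_A]
      have hcnt : (('A' :: rest).count 'A' : Int) = rest.count 'A' + 1 := by
        simp
      have hinf : (['L', 'L', 'L'] <:+: 'A' :: rest) ↔ (['L', 'L', 'L'] <:+: rest) := by
        rw [List.infix_cons_iff]
        constructor
        · rintro (hp | h)
          · exact absurd (List.cons_prefix_cons.mp hp).1 (by decide)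
          · exact h
        · exact Or.inr
      have hpre : ¬ (List.replicate (3 - l.toNat) 'L' <+: 'A' :: rest) := by
        rw [hrep, replicate_prefix_cons]
        rintro ⟨h, _⟩
        exact absurd h (by decide)
      by_cases ha : a + 1 > 1
      · rw [if_pos ha]
        simp only [Bool.false_eq_true, false_iff]
        rintro ⟨h1, _⟩
        omega
      · rw [if_neg ha, ih (a + 1) 0 (by omega) (by omega) (by omega) (by omega)]
        have himp : ¬ (['L', 'L', 'L'] <:+: rest) →
            ¬ (List.replicate (3 - (0 : Int).toNat) 'L' <+: rest) := by
          intro h hp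
          exact h (List.IsPrefix.isInfix (by simpa using hp))
        rw [hinf]
        constructor
        · rintro ⟨h1, h2, _⟩
          exact ⟨by omega, h2, fun hp => hpre hp⟩
        · rintro ⟨h1, h2, _⟩
          exact ⟨by omega, h2, himp h2⟩
    · by_cases hL : v = 'L'
      · subst hL
        rw [go_cons_L]
        have hcnt : (('L' :: rest).count 'A' : Int) = rest.count 'A' := by
          simp [List.count_cons]
        by_cases hl : l + 1 > 2
        · rw [if_pos (Or.inr hl)]
          have hone : List.replicate (3 - l.toNat) 'L' <+: 'L' :: rest := by
            have : 3 - l.toNat = 1 := by omega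
            rw [this]
            simp
          simp only [Bool.false_eq_true, false_iff]
          rintro ⟨_, _, h3⟩
          exact h3 hone
        · rw [if_neg (by omega), ih a (l + 1) ha0 ha1 (by omega) (by omega)]
          have hpre : (List.replicate (3 - l.toNat) 'L' <+: 'L' :: rest) ↔
              (List.replicate (3 - (l + 1).toNat) 'L' <+: rest) := by
            rw [hrep, replicate_prefix_cons]
            have : 2 - l.toNat = 3 - (l + 1).toNat := by omega
            rw [this]
            tauto
          have hinf : (['L', 'L', 'L'] <:+: 'L' :: rest) ↔
              (List.replicate 2 'L' <+: rest ∨ ['L', 'L', 'L'] <:+: rest) := by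
            rw [List.infix_cons_iff]
            constructor
            · rintro (hp | h)
              · exact Or.inl (by simpa [List.replicate] using (List.cons_prefix_cons.mp hp).2)
              · exact Or.inr h
            · rintro (hp | h)
              · exact Or.inl (List.cons_prefix_cons.mpr ⟨rfl, by simpa [List.replicate] using hp⟩)
              · exact Or.inr h
          rw [hcnt, hpre, hinf]
          constructor
          · rintro ⟨h1, h2, h3⟩
            refine ⟨h1, ?_, h3⟩
            rintro (hp | h)
            · exact h3 (replicate_prefix_mono 'L' rest (by omega) hp)
            · exact h2 h
          · rintro ⟨h1, h2, h3⟩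
            exact ⟨h1, fun h => h2 (Or.inr h), h3⟩
      · rw [go_cons_other v hA hL, if_neg (by omega),
          ih a 0 ha0 ha1 (by omega) (by omega)]
        have hcnt : ((v :: rest).count 'A' : Int) = rest.count 'A' := by
          simp [hA]
        have hinf : (['L', 'L', 'L'] <:+: v :: rest) ↔ (['L', 'L', 'L'] <:+: rest) := by
          rw [List.infix_cons_iff]
          constructor
          · rintro (hp | h)
            · exact absurd (List.cons_prefix_cons.mp hp).1.symm hL
            · exact h
          · exact Or.inr
        have hpre : ¬ (List.replicate (3 - l.toNat) 'L' <+: v :: rest) := by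
          rw [hrep, replicate_prefix_cons]
          rintro ⟨h, _⟩
          exact hL h
        have himp : ¬ (['L', 'L', 'L'] <:+: rest) →
            ¬ (List.replicate (3 - (0 : Int).toNat) 'L' <+: rest) := by
          intro h hp
          exact h (List.IsPrefix.isInfix (by simpa using hp))
        rw [hcnt, hinf]
        constructor
        · rintro ⟨h1, h2, _⟩
          exact ⟨h1, h2, fun hp => hpre hp⟩
        · rintro ⟨h1, h2, _⟩
          exact ⟨h1, h2, himp h2⟩

-- ===== VERDICT (by name: the statement is the Claim_ definition above) =====
theorem checkRecord_spec : Claim_equal_checkRecord := by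
  intro s _
  unfold Spec_checkRecord checkRecord checkRecord_alt
  rw [Bool.eq_iff_iff, go_spec s.toList 0 0 le_rfl (by omega) le_rfl (by omega)]
  have hc : PySem.Str.count s "A" = s.toList.count 'A' := by
    have hA' : ("A" : String).toList = ['A'] := rfl
    simp [PySem.Str.count, hA', count_singleton]
  have hiff : (PySem.Str.isIn "LLL" s = true) ↔ (['L', 'L', 'L'] <:+: s.toList) := by
    have hL' : ("LLL" : String).toList = ['L', 'L', 'L'] := rfl
    rw [PySem.Str.isIn_iff_infix, hL']
  constructor
  · rintro ⟨h1, h2, _⟩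
    have hf : PySem.Str.isIn "LLL" s = false := by
      cases hb : PySem.Str.isIn "LLL" s
      · rfl
      · exact absurd (hiff.mp hb) h2
    simp only [hf, Bool.not_false, Bool.and_true, decide_eq_true_iff, hc]
    omega
  · intro hB
    simp only [Bool.and_eq_true, decide_eq_true_iff, Bool.not_eq_true', hc] at hB
    obtain ⟨h1, h2⟩ := hB
    have hni : ¬ (['L', 'L', 'L'] <:+: s.toList) := fun h => by
      rw [hiff.mpr h] at h2
      cases h2
    refine ⟨by omega, hni, fun hp => hni ?_⟩
    have hrep : List.replicate (3 - (0 : Int).toNat) 'L' = ['L', 'L', 'L'] := rfl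
    rw [hrep] at hp
    exact List.IsPrefix.isInfix hp
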